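-- pv_equiv track=rewrite | github.com/HackTimel/MidTerm_Assignment_AMP | main.py | FindIncrease
-- ===== SOURCE A (Python) =====
-- def FindIncrease(lines):
--     current_min = lines[0]
--     max_increase =0
--     for i in range(len(lines)):
--         if lines[i] < current_min: #if a new min is found, we update the current min
--             current_min = lines[i]
--         if (lines[i]-current_min) > max_increase: #if a bigger increase is found, we update the biggest we found
--             max_increase = lines[i]-current_min
--     return max_increase
-- ===== SOURCE B (Python) =====
-- def FindIncrease(lines):
--     run = lines[-1]
--     suffix_max = []
--     for x in reversed(lines):
--         if x > run:
--             run = x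
--         suffix_max.append(run)
--     suffix_max.reverse()
--     best = 0
--     for x, m in zip(lines, suffix_max):
--         if m - x > best:
--             best = m - x
--     return best
-- ===== Notes on version B (the rewrite author's own statement) =====
-- stated objective: alternative
-- what changed: Replaces the single forward pass tracking a running minimum by a backward pass building a suffix-maximum table followed by a second pass taking the largest suffix_max[i]-lines[i], floored at 0.
import Mathlib
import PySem

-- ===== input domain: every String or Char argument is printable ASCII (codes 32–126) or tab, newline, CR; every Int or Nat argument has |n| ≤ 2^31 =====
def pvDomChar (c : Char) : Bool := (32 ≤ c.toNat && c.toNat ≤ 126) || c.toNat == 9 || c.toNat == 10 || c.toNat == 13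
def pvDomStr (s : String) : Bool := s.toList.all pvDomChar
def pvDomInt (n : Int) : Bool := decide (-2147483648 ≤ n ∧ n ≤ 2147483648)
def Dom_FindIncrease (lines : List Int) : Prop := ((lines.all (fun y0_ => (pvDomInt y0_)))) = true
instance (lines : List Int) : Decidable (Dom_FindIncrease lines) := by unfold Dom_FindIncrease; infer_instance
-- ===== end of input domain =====

-- B re-implements the same maximum-increase computation via a suffix-maximum table instead of a running minimum (alternative decomposition; return value only).
-- Pre_ excludes the empty list, on which Python A raises IndexError (lines[0]); B also raises there (lines[-1]).
-- ===== PORT A =====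
def stepA (st : Int × Int) (x : Int) : Int × Int :=
  let cm := if x < st.1 then x else st.1
  let mi := if x - cm > st.2 then x - cm else st.2
  (cm, mi)

def FindIncrease (lines : List Int) : Int :=
  -- lines[0]: Python raises IndexError on []; excluded by Pre_, default 0 unused there
  let current_min := lines.headD 0
  (lines.foldl stepA (current_min, (0 : Int))).2

-- ===== PORT B =====
def stepB (st : Int × List Int) (x : Int) : Int × List Int :=
  let run := if x > st.1 then x else st.1
  (run, st.2 ++ [run])

def stepC (best : Int) (p : Int × Int) : Int :=
  if p.2 - p.1 > best then p.2 - p.1 else best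

def FindIncrease_alt (lines : List Int) : Int :=
  -- lines[-1]: Python raises IndexError on []; excluded by Pre_, default 0 unused there
  let run0 := lines.getLastD 0
  let suffix := (lines.reverse.foldl stepB (run0, ([] : List Int))).2.reverse
  (lines.zip suffix).foldl stepC 0

-- ===== PRECONDITION & SPEC =====
-- Pre_ excludes exactly the empty list: both Pythons raise IndexError there.
def Pre_FindIncrease (lines : List Int) : Prop := lines ≠ []
instance (lines : List Int) : Decidable (Pre_FindIncrease lines) := by unfold Pre_FindIncrease; infer_instance
def pvWitness_FindIncrease : List Int := [3, 1, 4, 1, 5]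
def Spec_FindIncrease (lines : List Int) (out : Int) : Prop := out = FindIncrease_alt lines
instance (lines : List Int) (out : Int) : Decidable (Spec_FindIncrease lines out) := by unfold Spec_FindIncrease; infer_instance

-- ===== CLAIM (what is proved, stated in full; the proofs are below) =====
def Claim_equal_FindIncrease : Prop := ∀ (lines : List Int), Dom_FindIncrease lines → Pre_FindIncrease lines → Spec_FindIncrease lines (FindIncrease lines)

-- ===== LEMMAS AND PROOFS =====

-- max of a::l
def tmax (a : Int) (l : List Int) : Int := l.foldr max a

-- forward running-min gains (spec of A's fold)
def gf : Int → List Int → Int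
  | _, [] => 0
  | cm, x :: xs => max (x - min cm x) (gf (min cm x) xs)

-- max over suffixes of (suffix max - first element), floored at 0 by construction
def maxGain : List Int → Int
  | [] => 0
  | x :: xs => max (tmax x xs - x) (maxGain xs)

-- suffix-maximum table relative to seed r0
def sfxr (r0 : Int) : List Int → List Int
  | [] => []
  | x :: xs => tmax r0 (x :: xs) :: sfxr r0 xs

-- gains read off the suffix table
def gz (r0 : Int) : List Int → Int
  | [] => 0
  | x :: xs => max (tmax r0 (x :: xs) - x) (gz r0 xs)

theorem le_tmax_self (a : Int) (l : List Int) : a ≤ tmax a l := by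
  induction l with
  | nil => simp [tmax]
  | cons x xs ih => simp only [tmax, List.foldr] at *; omega

theorem tmax_max (a b : Int) (l : List Int) : tmax (max a b) l = max a (tmax b l) := by
  induction l with
  | nil => simp [tmax]
  | cons x xs ih => simp only [tmax, List.foldr] at *; omega

theorem tmax_mem_eq : ∀ (xs : List Int) (x a : Int), a ∈ x :: xs → tmax a (x :: xs) = tmax x xs := by
  intro xs
  induction xs with
  | nil =>
    intro x a h
    simp at h
    simp [h, tmax]
  | cons y ys ih =>
    intro x a h
    rcases List.mem_cons.1 h with h1 | h2
    · subst h1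
      have hs := le_tmax_self a (y :: ys)
      simp only [tmax, List.foldr] at *
      omega
    · have h3 := ih y a h2
      have h4 : tmax (max x y) ys = max x (tmax y ys) := tmax_max x y ys
      have h5 : tmax (max x y) ys = max y (tmax x ys) := by
        rw [max_comm x y]; exact tmax_max y x ys
      simp only [tmax, List.foldr] at *
      omega

theorem maxGain_nonneg (l : List Int) : 0 ≤ maxGain l := by
  induction l with
  | nil => simp [maxGain]
  | cons x xs ih =>
    have := le_tmax_self x xs
    simp only [maxGain]
    omega

theorem key : ∀ (l : List Int) (cm : Int), maxGain (cm :: l) = max 0 (gf cm l) := by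
  intro l
  induction l with
  | nil => intro cm; simp [maxGain, gf, tmax]
  | cons x xs ih =>
    intro cm
    have e1 : gf cm (x :: xs) = max (x - min cm x) (gf (min cm x) xs) := rfl
    have e2 : maxGain (cm :: x :: xs) = max (max x (tmax cm xs) - cm) (maxGain (x :: xs)) := rfl
    have e4 : maxGain (min cm x :: xs) = max (tmax (min cm x) xs - min cm x) (maxGain xs) := rfl
    have e5 : maxGain (x :: xs) = max (tmax x xs - x) (maxGain xs) := rfl
    have ihx := ih x
    have ihm := ih (min cm x)
    have hG := maxGain_nonneg xs
    have hle := le_tmax_self x xs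
    rw [e2, e1, e5]
    rw [e5] at ihx
    rw [e4] at ihm
    rcases le_total x cm with hc | hc
    · have hm : min cm x = x := min_eq_right hc
      have h1 : tmax cm xs = max cm (tmax x xs) := by
        have h := tmax_max cm x xs
        rwa [max_eq_left hc] at h
      rw [hm] at ihm ⊢
      omega
    · have hm : min cm x = cm := min_eq_left hc
      have h1 : tmax x xs = max x (tmax cm xs) := by
        have h := tmax_max x cm xs
        rwa [max_eq_left hc] at h
      rw [hm] at ihm ⊢
      omega

theorem Afold : ∀ (xs : List Int) (cm mi : Int), 0 ≤ mi →
    (List.foldl stepA (cm, mi) xs).2 = max mi (gf cm xs) := by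
  intro xs
  induction xs with
  | nil => intro cm mi h; simp [gf]; omega
  | cons x l ih =>
    intro cm mi h
    have hstep : stepA (cm, mi) x = (min cm x, max mi (x - min cm x)) := by
      simp only [stepA]
      split_ifs <;> simp_all <;> omega
    have hmi' : 0 ≤ max mi (x - min cm x) := by omega
    have := ih (min cm x) (max mi (x - min cm x)) hmi'
    simp only [List.foldl, hstep, gf]
    omega

theorem Bfoldr : ∀ (l : List Int) (r0 : Int) (acc : List Int),
    l.foldr (fun x st => stepB st x) (r0, acc) = (tmax r0 l, acc ++ (sfxr r0 l).reverse) := by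
  intro l
  induction l with
  | nil => intro r0 acc; simp [tmax, sfxr]
  | cons x xs ih =>
    intro r0 acc
    rw [List.foldr_cons, ih r0 acc]
    have hx : tmax r0 (x :: xs) = max x (tmax r0 xs) := rfl
    have h2 : (if x > tmax r0 xs then x else tmax r0 xs) = tmax r0 (x :: xs) := by
      rw [hx]; split_ifs <;> omega
    simp only [stepB, h2, sfxr, List.reverse_cons, List.append_assoc]

theorem zipfold : ∀ (l : List Int) (r0 b : Int), 0 ≤ b →
    (l.zip (sfxr r0 l)).foldl stepC b = max b (gz r0 l) := by
  intro l
  induction l with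
  | nil => intro r0 b h; simp [sfxr, gz]; omega
  | cons x xs ih =>
    intro r0 b h
    have hstep : stepC b (x, tmax r0 (x :: xs)) = max b (tmax r0 (x :: xs) - x) := by
      simp only [stepC]; split_ifs <;> omega
    have hb' : 0 ≤ max b (tmax r0 (x :: xs) - x) := by omega
    have := ih r0 (max b (tmax r0 (x :: xs) - x)) hb'
    simp only [sfxr, List.zip_cons_cons, List.foldl, hstep, gz]
    omega

theorem gz_eq_maxGain : ∀ (l : List Int) (h : l ≠ []), gz (l.getLast h) l = maxGain l := by
  intro l
  induction l with
  | nil => intro h; simp at h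
  | cons x xs ih =>
    intro h
    cases xs with
    | nil => simp [gz, maxGain, tmax]
    | cons y ys =>
      have hne : (y :: ys) ≠ ([] : List Int) := by simp
      have hlast : (x :: y :: ys).getLast h = (y :: ys).getLast hne := by
        simp [List.getLast]
      have hmem : (y :: ys).getLast hne ∈ y :: ys := List.getLast_mem hne
      have hmem2 : (y :: ys).getLast hne ∈ x :: y :: ys := List.mem_cons_of_mem x hmem
      have htm : tmax ((y :: ys).getLast hne) (x :: y :: ys) = tmax x (y :: ys) :=
        tmax_mem_eq (y :: ys) x _ hmem2
      have ihy := ih hne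
      have e1 : gz ((y :: ys).getLast hne) (x :: y :: ys) =
          max (tmax ((y :: ys).getLast hne) (x :: y :: ys) - x) (gz ((y :: ys).getLast hne) (y :: ys)) := rfl
      have e2 : maxGain (x :: y :: ys) = max (tmax x (y :: ys) - x) (maxGain (y :: ys)) := rfl
      rw [hlast, e1, e2, htm, ihy]

theorem A_eq_maxGain (x : Int) (xs : List Int) : FindIncrease (x :: xs) = maxGain (x :: xs) := by
  have h := Afold (x :: xs) x 0 (le_refl 0)
  simp only [FindIncrease, List.headD] at *
  rw [h]
  have : gf x (x :: xs) = max 0 (gf x xs) := by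
    simp [gf]
  rw [this, key xs x]
  omega

theorem B_eq_maxGain (x : Int) (xs : List Int) : FindIncrease_alt (x :: xs) = maxGain (x :: xs) := by
  have hne : (x :: xs) ≠ ([] : List Int) := by simp
  have hB := Bfoldr (x :: xs) ((x :: xs).getLastD 0) []
  have hlastD : (x :: xs).getLastD 0 = (x :: xs).getLast hne := by
    rw [List.getLastD_eq_getLast?, List.getLast?_eq_some_getLast hne]
    rfl
  simp only [FindIncrease_alt]
  rw [List.foldl_reverse, hB]
  simp only [List.nil_append, List.reverse_reverse]
  rw [hlastD]
  rw [zipfold (x :: xs) _ 0 (le_refl 0)]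
  rw [gz_eq_maxGain (x :: xs) hne]
  have := maxGain_nonneg (x :: xs)
  omega

-- ===== VERDICT (by name: the statement is the Claim_ definition above) =====
theorem FindIncrease_spec : Claim_equal_FindIncrease := by
  intro lines _ hpre
  unfold Spec_FindIncrease
  cases lines with
  | nil => exact absurd rfl hpre
  | cons x xs => rw [A_eq_maxGain, B_eq_maxGain]
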